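-- pv_equiv track=rewrite | github.com/sydanishraza/promptsupport.io | corrected_analysis.py | analyze_document_articles
-- ===== SOURCE A (Python) =====
-- def analyze_document_articles(recent_articles):
--     """Analyze articles by source document"""
--     document_analysis = {}
--
--     for article in recent_articles:
--         title = article.get('title', '').lower()
--         source = article.get('source_document', '').lower()
--
--         # Identify source document based on title and source
--         doc_key = None
--         if 'customer' in title or 'customer' in source:
--             doc_key = 'Customer Summary Screen User Guide'
--         elif 'google' in title or 'maps' in title or 'javascript' in title:
--             doc_key = 'Google Map JavaScript API Tutorial'
--         elif 'promotion' in title or 'promotion' in source: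
--             doc_key = 'Promotions Configuration and Management'
--         elif 'whisk' in title or 'studio' in title or 'integration' in title:
--             doc_key = 'Whisk Studio Integration Guide'
--
--         if doc_key:
--             if doc_key not in document_analysis:
--                 document_analysis[doc_key] = []
--             document_analysis[doc_key].append({
--                 'title': article.get('title', 'Untitled'),
--                 'created_at': article.get('created_at', ''),
--                 'id': article.get('id', ''),
--                 'status': article.get('status', 'unknown')
--             })
--
--     return document_analysis
-- ===== SOURCE B (Python) =====
-- # Staged map/filter/group-by: tag each article once, then build the result by
-- # grouping the tagged records per first-seen key, instead of A's single pass
-- # that mutates a dict with check-then-create appends.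
--
-- def _doc_key(article):
--     title = article.get('title', '').lower()
--     source = article.get('source_document', '').lower()
--     if 'customer' in title or 'customer' in source:
--         return 'Customer Summary Screen User Guide'
--     if 'google' in title or 'maps' in title or 'javascript' in title:
--         return 'Google Map JavaScript API Tutorial'
--     if 'promotion' in title or 'promotion' in source:
--         return 'Promotions Configuration and Management'
--     if 'whisk' in title or 'studio' in title or 'integration' in title:
--         return 'Whisk Studio Integration Guide'
--     return None
--
--
-- def _record(article):
--     return {
--         'title': article.get('title', 'Untitled'),
--         'created_at': article.get('created_at', ''),
--         'id': article.get('id', ''),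
--         'status': article.get('status', 'unknown'),
--     }
--
--
-- def analyze_document_articles(recent_articles):
--     """Analyze articles by source document"""
--     pairs = [(k, _record(a)) for a in recent_articles
--              for k in [_doc_key(a)] if k is not None]
--     keys = list(dict.fromkeys(k for k, _ in pairs))
--     return {k: [rec for k2, rec in pairs if k2 == k] for k in keys}
-- ===== Notes on version B (the rewrite author's own statement) =====
-- stated objective: alternative
-- what changed: Replaces A's single pass that mutates a dict with check-then-create appends by staged passes: tag each article with its doc key, dedup the keys in first-seen order, then build each group by filtering the tagged list.
import Mathlib
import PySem

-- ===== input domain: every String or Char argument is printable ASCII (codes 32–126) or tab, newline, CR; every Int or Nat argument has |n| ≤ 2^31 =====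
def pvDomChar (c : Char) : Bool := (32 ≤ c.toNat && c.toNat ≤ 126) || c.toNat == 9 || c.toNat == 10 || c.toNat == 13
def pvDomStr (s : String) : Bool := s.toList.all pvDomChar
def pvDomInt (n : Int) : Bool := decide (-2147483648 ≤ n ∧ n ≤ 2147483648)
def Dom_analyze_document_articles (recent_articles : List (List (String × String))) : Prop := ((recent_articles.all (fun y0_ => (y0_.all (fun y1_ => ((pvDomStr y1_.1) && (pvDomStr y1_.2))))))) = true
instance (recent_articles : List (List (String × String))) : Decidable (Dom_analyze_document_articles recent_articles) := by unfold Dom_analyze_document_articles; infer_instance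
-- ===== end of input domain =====

-- B replaces A's single dict-mutating pass by staged passes: tag each article, dedup the keys, group by filtering (objective: alternative).

-- article.get(k, d): first-match lookup in the association list representing the article dict
def pvGet (article : List (String × String)) (k d : String) : String :=
  (List.lookup k article).getD d

-- the normalized record dict literal both Pythons build (distinct literal keys → this assoc list)
def pvRecord (article : List (String × String)) : List (String × String) :=
  [("title", pvGet article "title" "Untitled"),
   ("created_at", pvGet article "created_at" ""),
   ("id", pvGet article "id" ""),
   ("status", pvGet article "status" "unknown")]

-- ===== PORT A =====
-- loop body of A; `document_analysis[doc_key].append(x)` (key present) is the dict write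
-- d[doc_key] = d[doc_key] + [x], i.e. insert of the extended list
def pvStepA (d : PySem.Dict String (List (List (String × String)))) (article : List (String × String)) :
    PySem.Dict String (List (List (String × String))) :=
  let title := PySem.Str.lower (pvGet article "title" "")
  let source := PySem.Str.lower (pvGet article "source_document" "")
  let doc_key : Option String :=
    if PySem.Str.isIn "customer" title || PySem.Str.isIn "customer" source then
      some "Customer Summary Screen User Guide"
    else if PySem.Str.isIn "google" title || PySem.Str.isIn "maps" title || PySem.Str.isIn "javascript" title then
      some "Google Map JavaScript API Tutorial"
    else if PySem.Str.isIn "promotion" title || PySem.Str.isIn "promotion" source then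
      some "Promotions Configuration and Management"
    else if PySem.Str.isIn "whisk" title || PySem.Str.isIn "studio" title || PySem.Str.isIn "integration" title then
      some "Whisk Studio Integration Guide"
    else none
  match doc_key with
  | none => d
  | some key =>
      let d' := if d.contains key then d else d.insert key []
      d'.insert key (d'.getD key [] ++ [pvRecord article])

def analyze_document_articles (recent_articles : List (List (String × String))) : List (String × List (List (String × String))) :=
  (recent_articles.foldl pvStepA PySem.Dict.empty).items

-- ===== PORT B =====
-- _doc_key: the early-return classification helper of Source B
def pvDocKey (article : List (String × String)) : Option String :=
  let title := PySem.Str.lower (pvGet article "title" "")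
  let source := PySem.Str.lower (pvGet article "source_document" "")
  if PySem.Str.isIn "customer" title || PySem.Str.isIn "customer" source then
    some "Customer Summary Screen User Guide"
  else if PySem.Str.isIn "google" title || PySem.Str.isIn "maps" title || PySem.Str.isIn "javascript" title then
    some "Google Map JavaScript API Tutorial"
  else if PySem.Str.isIn "promotion" title || PySem.Str.isIn "promotion" source then
    some "Promotions Configuration and Management"
  else if PySem.Str.isIn "whisk" title || PySem.Str.isIn "studio" title || PySem.Str.isIn "integration" title then
    some "Whisk Studio Integration Guide"
  else none

-- the comprehension building `pairs`: skip None tags, keep (doc_key, record)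
def pvTag (article : List (String × String)) : Option (String × List (String × String)) :=
  (pvDocKey article).map (fun k => (k, pvRecord article))

-- staged passes: pairs, then first-seen-ordered keys (dict.fromkeys = PySem.List.dedup), then group by filter
def analyze_document_articles_alt (recent_articles : List (List (String × String))) : List (String × List (List (String × String))) :=
  let pairs := recent_articles.filterMap pvTag
  let keys := PySem.List.dedup (pairs.map (fun p => p.1))
  keys.map (fun k => (k, (pairs.filter (fun p => p.1 == k)).map (fun p => p.2)))

-- ===== PRECONDITION & SPEC =====
def Spec_analyze_document_articles (recent_articles : List (List (String × String))) (out : List (String × List (List (String × String)))) : Prop := out = analyze_document_articles_alt recent_articles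
instance (recent_articles : List (List (String × String))) (out : List (String × List (List (String × String)))) : Decidable (Spec_analyze_document_articles recent_articles out) := by unfold Spec_analyze_document_articles; infer_instance

-- ===== CLAIM (what is proved, stated in full; the proofs are below) =====
def Claim_equal_analyze_document_articles : Prop := ∀ (recent_articles : List (List (String × String))), Dom_analyze_document_articles recent_articles → Spec_analyze_document_articles recent_articles (analyze_document_articles recent_articles)

-- ===== LEMMAS AND PROOFS =====

-- A's ensure-then-append dict write equals a single modify-append write
theorem pvUpd_eq (d : PySem.Dict String (List (List (String × String)))) (key : String)
    (r : List (String × String)) :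
    (if d.contains key then d else d.insert key []).insert key
      ((if d.contains key then d else d.insert key []).getD key [] ++ [r]) =
    d.modify key [] (· ++ [r]) := by
  have hmod : d.modify key [] (· ++ [r]) = d.insert key (d.getD key [] ++ [r]) := rfl
  rw [hmod]
  cases hc : d.contains key <;>
    simp [hc, PySem.Dict.getD_insert_self, PySem.Dict.insert_insert_self,
          PySem.Dict.getD_of_not_contains]

-- A's loop body, expressed through B's classifier: skip untagged articles, modify-append otherwise
theorem pvStepA_eq (d : PySem.Dict String (List (List (String × String)))) (a : List (String × String)) :
    pvStepA d a = match pvTag a with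
      | none => d
      | some p => d.modify p.1 [] (· ++ [p.2]) := by
  simp only [pvStepA, pvTag, pvDocKey]
  split_ifs with h1 h2 h3 h4 <;> simp <;> exact pvUpd_eq d _ (pvRecord a)

-- A's whole fold over articles is the modify-append fold over B's tagged pairs
theorem pvFoldA_eq (ras : List (List (String × String)))
    (d : PySem.Dict String (List (List (String × String)))) :
    ras.foldl pvStepA d =
    (ras.filterMap pvTag).foldl (fun d p => d.modify p.1 [] (· ++ [p.2])) d := by
  induction ras generalizing d with
  | nil => rfl
  | cons a ras ih =>
      cases h : pvTag a <;>
        simp [h, List.foldl_cons, pvStepA_eq, ih]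

theorem analyze_document_articles_spec : Claim_equal_analyze_document_articles := by
  intro recent_articles _
  unfold Spec_analyze_document_articles analyze_document_articles analyze_document_articles_alt
  rw [pvFoldA_eq]
  set pairs := recent_articles.filterMap pvTag with hpairs
  set D := pairs.foldl (fun d p => d.modify p.1 [] (· ++ [p.2])) PySem.Dict.empty with hD
  have hnd : D.keys.Nodup := by
    rw [hD]
    exact PySem.Dict.nodup_keys_foldl_modify_key pairs (fun p => p.1) [] (fun _ p => (· ++ [p.2]))
      PySem.Dict.empty (by simp)
  have hkeys : D.keys = PySem.List.dedup (pairs.map (fun p => p.1)) := by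
    rw [hD, PySem.Dict.keys_foldl_modify_key]
    simp [PySem.List.dedup_eq_ofList, PySem.Set.update, PySem.Set.ofList, PySem.Dict.keys_empty]
  have hget : ∀ k, D.getD k [] = (pairs.filter (fun p => p.1 == k)).map (fun p => p.2) := by
    intro k
    rw [hD, PySem.Dict.getD_foldl_modify_append]
    simp [PySem.Dict.getD_empty]
  rw [PySem.Dict.items_eq_map_keys D hnd [], hkeys]
  exact List.map_congr_left (fun k _ => by rw [hget k])
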